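-- pv_equiv track=rewrite | github.com/PyroGenesis/Codiq | LeetCode/2306-Naming-a-Company.py | distinctNamesGroupBySuffix
-- ===== SOURCE A (Python) =====
-- from collections import defaultdict
-- from typing import List
--
-- def distinctNamesGroupBySuffix(ideas: List[str]) -> int:
--     companies = 0
--     groups = defaultdict(set)
--     for idea in ideas:
--         groups[idea[1:]].add(idea[0])
--
--     prefix_sets = list(groups.values())
--     n = len(prefix_sets)
--     for i in range(n):
--         for j in range(i+1, n):
--             mutual_count = len(prefix_sets[i] & prefix_sets[j])
--             companies += (len(prefix_sets[i]) - mutual_count) * (len(prefix_sets[j]) - mutual_count) * 2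
--
--     return companies
-- ===== SOURCE B (Python) =====
-- def distinctNamesGroupBySuffix(ideas):
--     groups = {}
--     for idea in ideas:
--         groups.setdefault(idea[1:], set()).add(idea[0])
--     vals = list(groups.values())
--     cnt = {}
--     for s in vals:
--         for a in s:
--             cnt[a] = cnt.get(a, 0) + 1
--     both = {}
--     for s in vals:
--         for a in s:
--             for b in s:
--                 if b != a:
--                     both[(a, b)] = both.get((a, b), 0) + 1
--     letters = list(cnt)
--     total = 0
--     for a in letters:
--         for b in letters:
--             if b != a:
--                 m = both.get((a, b), 0)
--                 total += (cnt[a] - m) * (cnt[b] - m)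
--     return total
-- ===== Notes on version B (the rewrite author's own statement) =====
-- stated objective: faster
-- what changed: Instead of comparing every pair of suffix groups (O(G^2) with set intersections), B counts, per first letter a, how many groups contain a (cnt) and, per ordered letter pair (a,b), how many groups contain both (both), then sums (cnt[a]-both[a,b])*(cnt[b]-both[a,b]) over ordered pairs of distinct letters.
import Mathlib
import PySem

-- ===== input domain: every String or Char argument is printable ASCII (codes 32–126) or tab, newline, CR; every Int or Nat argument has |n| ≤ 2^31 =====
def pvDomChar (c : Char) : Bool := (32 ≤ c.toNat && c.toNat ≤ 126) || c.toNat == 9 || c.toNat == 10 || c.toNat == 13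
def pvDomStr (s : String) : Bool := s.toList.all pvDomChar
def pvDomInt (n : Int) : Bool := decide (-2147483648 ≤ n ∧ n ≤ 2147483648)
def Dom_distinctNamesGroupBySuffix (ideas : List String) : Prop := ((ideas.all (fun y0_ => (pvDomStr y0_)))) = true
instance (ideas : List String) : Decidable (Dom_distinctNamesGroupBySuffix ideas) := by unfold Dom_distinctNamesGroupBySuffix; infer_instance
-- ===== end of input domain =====

-- B replaces A's O(G^2) pairwise comparison of suffix groups by per-letter / per-letter-pair
-- group counts summed over ordered pairs of distinct first letters (objective: faster, measured).

-- ===== PORT A =====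
-- groups[idea[1:]].add(idea[0]) over a defaultdict(set)
def buildGroupsA (ideas : List String) : PySem.Dict String (PySem.Set Char) :=
  ideas.foldl (fun d idea =>
    d.insert (PySem.Str.slice idea (some 1) none)
      (PySem.Set.add (d.getD (PySem.Str.slice idea (some 1) none) PySem.Set.empty)
        (PySem.List.pyGetD idea.toList 0 ' '))) PySem.Dict.empty

def distinctNamesGroupBySuffix (ideas : List String) : Int :=
  let groups := buildGroupsA ideas
  let prefix_sets := groups.values
  let n : Int := PySem.List.len prefix_sets
  (PySem.List.pyRange 0 n).foldl (fun companies i =>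
    (PySem.List.pyRange (i + 1) n).foldl (fun companies j =>
      let Pi := PySem.List.pyGetD prefix_sets i PySem.Set.empty
      let Pj := PySem.List.pyGetD prefix_sets j PySem.Set.empty
      let mutual_count := PySem.Set.len (PySem.Set.inter Pi Pj)
      companies + (PySem.Set.len Pi - mutual_count) * (PySem.Set.len Pj - mutual_count) * 2)
      companies) 0

-- ===== PORT B =====
-- groups.setdefault(idea[1:], set()).add(idea[0])
def buildGroupsB (ideas : List String) : PySem.Dict String (PySem.Set Char) :=
  ideas.foldl (fun d idea =>
    let d' := d.setdefault (PySem.Str.slice idea (some 1) none) PySem.Set.empty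
    d'.insert (PySem.Str.slice idea (some 1) none)
      (PySem.Set.add (d'.getD (PySem.Str.slice idea (some 1) none) PySem.Set.empty)
        (PySem.List.pyGetD idea.toList 0 ' '))) PySem.Dict.empty

def distinctNamesGroupBySuffix_alt (ideas : List String) : Int :=
  let groups := buildGroupsB ideas
  let vals := groups.values
  let cnt : PySem.Dict Char Int :=
    vals.foldl (fun cnt s =>
      s.foldl (fun cnt a => cnt.insert a (cnt.getD a 0 + 1)) cnt) PySem.Dict.empty
  let both : PySem.Dict (Char × Char) Int :=
    vals.foldl (fun both s =>
      s.foldl (fun both a =>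
        s.foldl (fun both b =>
          if b ≠ a then both.insert (a, b) (both.getD (a, b) 0 + 1) else both) both) both)
      PySem.Dict.empty
  let letters := cnt.keys
  letters.foldl (fun total a =>
    letters.foldl (fun total b =>
      if b ≠ a then
        let m := both.getD (a, b) 0
        total + (cnt.getD a 0 - m) * (cnt.getD b 0 - m)
      else total) total) 0

-- ===== PRECONDITION & SPEC =====
-- Pre_ excludes lists containing the empty string, on which the Python A raises IndexError (idea[0]).
def Pre_distinctNamesGroupBySuffix (ideas : List String) : Prop := ∀ s ∈ ideas, s ≠ ""
instance (ideas : List String) : Decidable (Pre_distinctNamesGroupBySuffix ideas) := by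
  unfold Pre_distinctNamesGroupBySuffix; infer_instance

def pvWitness_distinctNamesGroupBySuffix : List String := ["ice", "mice", "rat"]

def Spec_distinctNamesGroupBySuffix (ideas : List String) (out : Int) : Prop := out = distinctNamesGroupBySuffix_alt ideas
instance (ideas : List String) (out : Int) : Decidable (Spec_distinctNamesGroupBySuffix ideas out) := by unfold Spec_distinctNamesGroupBySuffix; infer_instance

-- ===== CLAIM (what is proved, stated in full; the proofs are below) =====
def Claim_equal_distinctNamesGroupBySuffix : Prop := ∀ (ideas : List String), Dom_distinctNamesGroupBySuffix ideas → Pre_distinctNamesGroupBySuffix ideas → Spec_distinctNamesGroupBySuffix ideas (distinctNamesGroupBySuffix ideas)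

-- ===== LEMMAS AND PROOFS =====

-- A's pair term and A's double loop as structural recursion
def fA (g h : PySem.Set Char) : Int :=
  (PySem.Set.len g - PySem.Set.len (PySem.Set.inter g h)) *
  (PySem.Set.len h - PySem.Set.len (PySem.Set.inter g h)) * 2

def pairA : List (PySem.Set Char) → Int
  | [] => 0
  | g :: t => (t.map (fun h => fA g h)).sum + pairA t

-- number of groups containing a but not b
def W (gs : List (PySem.Set Char)) (a b : Char) : Int :=
  ((gs.countP (fun g => g.contains a && !g.contains b) : Nat) : Int)

-- the two group-building loops build the same dict
lemma step_eq (d : PySem.Dict String (PySem.Set Char)) (k : String) (c : Char) :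
    ((d.setdefault k PySem.Set.empty).insert k
      (PySem.Set.add ((d.setdefault k PySem.Set.empty).getD k PySem.Set.empty) c))
    = d.insert k (PySem.Set.add (d.getD k PySem.Set.empty) c) := by
  by_cases h : d.contains k = true
  · rw [PySem.Dict.setdefault_of_contains d _ h]
  · have hf : d.contains k = false := by simpa using h
    rw [PySem.Dict.setdefault_of_not_contains d _ hf, PySem.Dict.getD_insert_self,
        PySem.Dict.insert_insert_self, PySem.Dict.getD_of_not_contains d _ hf]

lemma groups_eq (ideas : List String) : buildGroupsB ideas = buildGroupsA ideas := by
  unfold buildGroupsA buildGroupsB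
  congr 1
  funext d idea
  exact step_eq d _ _

-- every value in the groups dict is a Nodup list (it is a Python set)
lemma values_nodup_aux (ideas : List String) :
    ∀ (d : PySem.Dict String (PySem.Set Char)), (∀ v ∈ d.values, List.Nodup v) →
      ∀ v ∈ (ideas.foldl (fun d idea =>
        d.insert (PySem.Str.slice idea (some 1) none)
          (PySem.Set.add (d.getD (PySem.Str.slice idea (some 1) none) PySem.Set.empty)
            (PySem.List.pyGetD idea.toList 0 ' '))) d).values, List.Nodup v := by
  induction ideas with
  | nil => intro d hd; simpa using hd
  | cons idea rest ih =>
    intro d hd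
    simp only [List.foldl_cons]
    apply ih
    intro v hv
    rcases PySem.Dict.mem_values_insert _ _ _ _ hv with h | h
    · subst h
      apply PySem.Set.nodup_add
      rw [PySem.Dict.getD_eq_get?_getD]
      cases hq : PySem.Dict.get? d (PySem.Str.slice idea (some 1) none) with
      | none => simp [PySem.Set.empty]
      | some v0 =>
        simp only [Option.getD_some]
        apply hd
        have h2 := PySem.Dict.mem_items_of_get?_eq_some d hq
        exact List.mem_map_of_mem (f := Prod.snd) h2
    · exact hd v h

lemma values_nodupA (ideas : List String) :
    ∀ v ∈ (buildGroupsA ideas).values, List.Nodup v := by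
  unfold buildGroupsA
  apply values_nodup_aux
  intro v hv
  cases hv

-- ==== A side: the index double loop equals pairA ====
def aBody (xs : List (PySem.Set Char)) (companies : Int) (i : Int) : Int :=
  (PySem.List.pyRange (i + 1) (PySem.List.len xs)).foldl (fun companies j =>
    let Pi := PySem.List.pyGetD xs i PySem.Set.empty
    let Pj := PySem.List.pyGetD xs j PySem.Set.empty
    let mutual_count := PySem.Set.len (PySem.Set.inter Pi Pj)
    companies + (PySem.Set.len Pi - mutual_count) * (PySem.Set.len Pj - mutual_count) * 2)
    companies

lemma aBody_eq (xs : List (PySem.Set Char)) (c : Int) (i : Int)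
    (h0i : 0 ≤ i) (hlt : i < (xs.length : Int)) :
    aBody xs c i
      = c + ((xs.drop (i.toNat + 1)).map (fun h => fA (xs.getD i.toNat PySem.Set.empty) h)).sum := by
  unfold aBody
  have h0 : (0:Int) ≤ i + 1 := by omega
  have h1 : (i + 1).toNat = i.toNat + 1 := by omega
  have hltn : i.toNat < xs.length := by omega
  have hPi : PySem.List.pyGetD xs i PySem.Set.empty = xs.getD i.toNat PySem.Set.empty := by
    rw [PySem.List.pyGetD_eq_getElem xs PySem.Set.empty h0i (by simpa using hlt),
        List.getD_eq_getElem xs _ hltn]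
  rw [PySem.List.foldl_pyRange_pyGetD xs PySem.Set.empty
      (fun c P => c +
        (PySem.Set.len (PySem.List.pyGetD xs i PySem.Set.empty) -
          PySem.Set.len (PySem.Set.inter (PySem.List.pyGetD xs i PySem.Set.empty) P)) *
        (PySem.Set.len P -
          PySem.Set.len (PySem.Set.inter (PySem.List.pyGetD xs i PySem.Set.empty) P)) * 2) c h0,
      PySem.List.foldl_add, h1, hPi]
  rfl

lemma aLoop_eq (xs : List (PySem.Set Char)) :
    ∀ (m k : Nat), xs.length - k ≤ m → ∀ c : Int,
      (PySem.List.pyRange (k : Int) (PySem.List.len xs)).foldl (aBody xs) c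
        = c + pairA (xs.drop k) := by
  intro m
  induction m with
  | zero =>
    intro k hk c
    have hk' : xs.length ≤ k := by omega
    rw [PySem.List.pyRange_one_eq_nil (by simp; exact_mod_cast hk'),
        List.drop_eq_nil_of_le hk']
    simp [pairA]
  | succ m ih =>
    intro k hk c
    by_cases hlt : k < xs.length
    · rw [PySem.List.pyRange_one_cons (by simp; exact_mod_cast hlt), List.foldl_cons,
          aBody_eq xs c (k : Int) (by omega) (by exact_mod_cast hlt),
          show ((k : Int) + 1) = ((k + 1 : Nat) : Int) from by push_cast; ring,
          ih (k + 1) (by omega)]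
      rw [List.drop_eq_getElem_cons hlt, pairA]
      simp only [Int.toNat_natCast]
      rw [List.getD_eq_getElem xs _ hlt]
      ring
    · have hk' : xs.length ≤ k := by omega
      rw [PySem.List.pyRange_one_eq_nil (by simp; exact_mod_cast hk'),
          List.drop_eq_nil_of_le hk']
      simp [pairA]

lemma A_eq_pairA (xs : List (PySem.Set Char)) :
    (PySem.List.pyRange 0 (PySem.List.len xs)).foldl (aBody xs) 0 = pairA xs := by
  have h := aLoop_eq xs xs.length 0 (by omega) 0
  simpa using h

-- ==== combinatorial counting lemmas ====
lemma count_nodup (s : List Char) (hs : s.Nodup) (a : Char) :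
    (s.count a : Int) = if a ∈ s then 1 else 0 := by
  by_cases h : a ∈ s
  · simp [List.count_eq_one_of_mem hs h, h]
  · simp [List.count_eq_zero_of_not_mem h, h]

lemma countSym (g h : List Char) (hg : g.Nodup) (hh : h.Nodup) :
    (g.filter (fun a => List.contains h a)).length = (h.filter (fun a => List.contains g a)).length := by
  have hperm : (g.filter (fun a => List.contains h a)).Perm (h.filter (fun a => List.contains g a)) := by
    rw [List.perm_ext_iff_of_nodup (hg.filter _) (hh.filter _)]
    intro a
    simp only [List.mem_filter, List.contains_eq_mem, decide_eq_true_eq]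
    tauto
  exact hperm.length_eq

lemma filter_partition (g : List Char) (h : List Char) :
    ((g.filter (fun a => !List.contains h a)).length : Int)
      = (g.length : Int) - ((g.filter (fun a => List.contains h a)).length : Int) := by
  induction g with
  | nil => simp
  | cons x t ih =>
    by_cases hx : x ∈ h <;>
      simp [List.filter_cons, List.contains_eq_mem, hx] <;>
      simp only [List.contains_eq_mem] at ih <;> push_cast <;> omega

lemma fA_eq (g h : PySem.Set Char) (hg : g.Nodup) (hh : h.Nodup) :
    fA g h = 2 * ((g.filter (fun a => !List.contains h a)).length : Int)
               * ((h.filter (fun a => !List.contains g a)).length : Int) := by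
  have hA : fA g h =
      ((g.length : Int) - ((g.filter (fun a => List.contains h a)).length : Int)) *
      ((h.length : Int) - ((g.filter (fun a => List.contains h a)).length : Int)) * 2 := rfl
  have hsym : ((g.filter (fun a => List.contains h a)).length : Int)
      = ((h.filter (fun a => List.contains g a)).length : Int) := by
    exact_mod_cast countSym g h hg hh
  have e1 := filter_partition g h
  have e2 := filter_partition h g
  rw [hA]
  calc (↑g.length - ↑(g.filter (fun a => List.contains h a)).length) *
        (↑h.length - ↑(g.filter (fun a => List.contains h a)).length) * 2
      = (↑g.length - ↑(g.filter (fun a => List.contains h a)).length) *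
        (↑h.length - ↑(h.filter (fun a => List.contains g a)).length) * 2 := by rw [hsym]
    _ = 2 * ((g.filter (fun a => !List.contains h a)).length : Int)
          * ((h.filter (fun a => !List.contains g a)).length : Int) := by rw [e1, e2]; ring

lemma sum_ind (S : Finset Char) (g h : List Char) (hg : g.Nodup) (hsub : ∀ a ∈ g, a ∈ S) :
    (∑ a ∈ S, if a ∈ g ∧ a ∉ h then (1 : Int) else 0)
      = ((g.filter (fun a => !List.contains h a)).length : Int) := by
  rw [Finset.sum_boole]
  have hset : S.filter (fun a => a ∈ g ∧ a ∉ h) = (g.filter (fun a => !List.contains h a)).toFinset := by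
    ext x
    simp only [Finset.mem_filter, List.mem_toFinset, List.mem_filter,
      List.contains_eq_mem, Bool.not_eq_true', decide_eq_false_iff_not]
    constructor
    · rintro ⟨-, hx, hxh⟩; exact ⟨hx, hxh⟩
    · rintro ⟨hx, hxh⟩; exact ⟨hsub x hx, hx, hxh⟩
  rw [hset, List.toFinset_card_of_nodup (hg.filter _)]

lemma W_eq_sum (t : List (PySem.Set Char)) (a b : Char) :
    W t a b = (t.map (fun h => if a ∈ h ∧ b ∉ h then (1 : Int) else 0)).sum := by
  induction t with
  | nil => simp [W]
  | cons s t ih =>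
    simp only [List.map_cons, List.sum_cons, ← ih]
    unfold W
    rw [List.countP_cons]
    by_cases h1 : a ∈ s <;> by_cases h2 : b ∈ s <;>
      simp [h1, h2, List.contains_eq_mem] <;> push_cast <;> ring

lemma sum_swap_list {α : Type} (S : Finset Char) (l : List α) (f : Char → α → Int) :
    (∑ x ∈ S, (l.map (f x)).sum) = (l.map (fun y => ∑ x ∈ S, f x y)).sum := by
  induction l with
  | nil => simp
  | cons y t ih => simp [Finset.sum_add_distrib, ih]

-- ==== the core identity ====
theorem core (gs : List (PySem.Set Char)) (hn : ∀ g ∈ gs, List.Nodup g)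
    (S : Finset Char) (hcov : ∀ g ∈ gs, ∀ a ∈ g, a ∈ S) :
    pairA gs = ∑ a ∈ S, ∑ b ∈ S, (if b ≠ a then W gs a b * W gs b a else 0) := by
  induction gs with
  | nil => simp [pairA, W]
  | cons g t ih =>
    have hg : g.Nodup := hn g (by simp)
    have hnt : ∀ h ∈ t, List.Nodup h := fun h hh => hn h (by simp [hh])
    have hcovt : ∀ h ∈ t, ∀ a ∈ h, a ∈ S := fun h hh => hcov h (by simp [hh])
    have hcovg : ∀ a ∈ g, a ∈ S := hcov g (by simp)
    have hWcons : ∀ a b : Char, W (g :: t) a b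
        = W t a b + (if a ∈ g ∧ b ∉ g then (1:Int) else 0) := by
      intro a b
      unfold W
      rw [List.countP_cons]
      by_cases h1 : a ∈ g <;> by_cases h2 : b ∈ g <;>
        simp [h1, h2, List.contains_eq_mem] <;> push_cast <;> ring
    have hpt : ∀ a b : Char,
        (if b ≠ a then W (g::t) a b * W (g::t) b a else 0)
        = (if b ≠ a then W t a b * W t b a else 0)
          + (if a ∈ g ∧ b ∉ g then (1:Int) else 0) * W t b a
          + W t a b * (if b ∈ g ∧ a ∉ g then (1:Int) else 0) := by
      intro a b
      by_cases hba : b = a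
      · subst hba
        by_cases h1 : b ∈ g <;> simp [h1]
      · rw [if_pos (Ne.symm (by exact fun h => hba h.symm)), if_pos (Ne.symm (by exact fun h => hba h.symm)),
            hWcons a b, hWcons b a]
        by_cases h1 : a ∈ g <;> by_cases h2 : b ∈ g <;> simp [h1, h2] <;> ring
    calc pairA (g :: t)
        = (t.map (fun h => fA g h)).sum + pairA t := rfl
      _ = ∑ a ∈ S, ∑ b ∈ S, ((if b ≠ a then W t a b * W t b a else 0)
            + (if a ∈ g ∧ b ∉ g then (1:Int) else 0) * W t b a
            + W t a b * (if b ∈ g ∧ a ∉ g then (1:Int) else 0)) := by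
          rw [ih hnt hcovt]
          simp only [Finset.sum_add_distrib]
          -- goal: map-sum + Σ ite = Σ ite + Σ δ·W + Σ W·δ
          have hswap : (∑ a ∈ S, ∑ b ∈ S, W t a b * (if b ∈ g ∧ a ∉ g then (1:Int) else 0))
              = ∑ a ∈ S, ∑ b ∈ S, (if a ∈ g ∧ b ∉ g then (1:Int) else 0) * W t b a := by
            rw [Finset.sum_comm]
            apply Finset.sum_congr rfl; intro a _
            apply Finset.sum_congr rfl; intro b _
            ring
          rw [hswap]
          have hδW : (∑ a ∈ S, ∑ b ∈ S, (if a ∈ g ∧ b ∉ g then (1:Int) else 0) * W t b a)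
              = (t.map (fun h => ((g.filter (fun x => !List.contains h x)).length : Int)
                  * ((h.filter (fun x => !List.contains g x)).length : Int))).sum := by
            have e1 : ∀ a b : Char, (if a ∈ g ∧ b ∉ g then (1:Int) else 0) * W t b a
                = (t.map (fun h => (if a ∈ g ∧ b ∉ g then (1:Int) else 0)
                    * (if b ∈ h ∧ a ∉ h then (1:Int) else 0))).sum := by
              intro a b
              rw [W_eq_sum, List.sum_map_mul_left]
            calc (∑ a ∈ S, ∑ b ∈ S, (if a ∈ g ∧ b ∉ g then (1:Int) else 0) * W t b a)
                = ∑ a ∈ S, (t.map (fun h => ∑ b ∈ S, (if a ∈ g ∧ b ∉ g then (1:Int) else 0)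
                    * (if b ∈ h ∧ a ∉ h then (1:Int) else 0))).sum := by
                  apply Finset.sum_congr rfl; intro a _
                  rw [← sum_swap_list]
                  exact Finset.sum_congr rfl (fun b _ => e1 a b)
              _ = (t.map (fun h => ∑ a ∈ S, ∑ b ∈ S, (if a ∈ g ∧ b ∉ g then (1:Int) else 0)
                    * (if b ∈ h ∧ a ∉ h then (1:Int) else 0))).sum := by
                  rw [← sum_swap_list]
              _ = (t.map (fun h => ((g.filter (fun x => !List.contains h x)).length : Int)
                  * ((h.filter (fun x => !List.contains g x)).length : Int))).sum := by
                  apply congrArg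
                  apply List.map_congr_left
                  intro h hh
                  have hpt2 : ∀ a b : Char,
                      (if a ∈ g ∧ b ∉ g then (1:Int) else 0) * (if b ∈ h ∧ a ∉ h then (1:Int) else 0)
                      = (if a ∈ g ∧ a ∉ h then (1:Int) else 0) * (if b ∈ h ∧ b ∉ g then (1:Int) else 0) := by
                    intro a b
                    by_cases h1 : a ∈ g <;> by_cases h2 : b ∈ g <;>
                      by_cases h3 : a ∈ h <;> by_cases h4 : b ∈ h <;> simp [h1, h2, h3, h4]
                  calc (∑ a ∈ S, ∑ b ∈ S, (if a ∈ g ∧ b ∉ g then (1:Int) else 0)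
                        * (if b ∈ h ∧ a ∉ h then (1:Int) else 0))
                      = ∑ a ∈ S, ∑ b ∈ S, (if a ∈ g ∧ a ∉ h then (1:Int) else 0)
                        * (if b ∈ h ∧ b ∉ g then (1:Int) else 0) := by
                        exact Finset.sum_congr rfl (fun a _ => Finset.sum_congr rfl (fun b _ => hpt2 a b))
                    _ = (∑ a ∈ S, (if a ∈ g ∧ a ∉ h then (1:Int) else 0))
                        * (∑ b ∈ S, (if b ∈ h ∧ b ∉ g then (1:Int) else 0)) := by
                        rw [Finset.sum_mul_sum]
                    _ = ((g.filter (fun x => !List.contains h x)).length : Int)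
                        * ((h.filter (fun x => !List.contains g x)).length : Int) := by
                        rw [sum_ind S g h hg hcovg, sum_ind S h g (hnt h hh) (hcovt h hh)]
          rw [hδW]
          have hmap : (t.map (fun h => fA g h)).sum
              = (t.map (fun h => 2 * ((g.filter (fun x => !List.contains h x)).length : Int)
                  * ((h.filter (fun x => !List.contains g x)).length : Int))).sum := by
            apply congrArg
            apply List.map_congr_left
            intro h hh
            exact fA_eq g h hg (hnt h hh)
          rw [hmap]
          have : (t.map (fun h => 2 * ((g.filter (fun x => !List.contains h x)).length : Int)
              * ((h.filter (fun x => !List.contains g x)).length : Int))).sum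
              = 2 * (t.map (fun h => ((g.filter (fun x => !List.contains h x)).length : Int)
                  * ((h.filter (fun x => !List.contains g x)).length : Int))).sum := by
            rw [← List.sum_map_mul_left]
            apply congrArg
            apply List.map_congr_left
            intro h hh
            ring
          rw [this]
          ring
      _ = ∑ a ∈ S, ∑ b ∈ S, (if b ≠ a then W (g::t) a b * W (g::t) b a else 0) := by
          apply Finset.sum_congr rfl; intro a _
          apply Finset.sum_congr rfl; intro b _
          rw [hpt a b]

-- ==== B side characterizations ====
lemma cnt_getD (gs : List (PySem.Set Char)) :
    ∀ (d : PySem.Dict Char Int) (a : Char),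
      ((gs.foldl (fun cnt s => s.foldl (fun cnt a => cnt.insert a (cnt.getD a 0 + 1)) cnt) d).getD a 0)
        = d.getD a 0 + (gs.map (fun s => (s.count a : Int))).sum := by
  induction gs with
  | nil => simp
  | cons s t ih =>
    intro d a
    simp only [List.foldl_cons, List.map_cons, List.sum_cons]
    rw [ih, PySem.Dict.getD_foldl_insert_add_one]
    push_cast
    ring

lemma cnt_keys (gs : List (PySem.Set Char)) :
    ∀ (d : PySem.Dict Char Int),
      (gs.foldl (fun cnt s => s.foldl (fun cnt a => cnt.insert a (cnt.getD a 0 + 1)) cnt) d).keys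
        = PySem.Set.update d.keys gs.flatten := by
  induction gs with
  | nil => intro d; simp [PySem.Set.update]
  | cons s t ih =>
    intro d
    simp only [List.foldl_cons, List.flatten_cons]
    rw [ih, PySem.Dict.keys_foldl_insert, PySem.Set.update_append]

lemma both_inner (s : List Char) (a' : Char) :
    ∀ (d : PySem.Dict (Char × Char) Int) (a b : Char),
      (s.foldl (fun bo b' => if b' ≠ a' then bo.insert (a', b') (bo.getD (a', b') 0 + 1) else bo) d).getD (a, b) 0
        = d.getD (a, b) 0 + (if a' = a ∧ b ≠ a' then (s.count b : Int) else 0) := by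
  induction s with
  | nil => simp
  | cons b' s ih =>
    intro d a b
    simp only [List.foldl_cons]
    by_cases hba : b' ≠ a'
    · rw [if_pos hba, ih, PySem.Dict.getD_insert, List.count_cons]
      by_cases hK : a' = a ∧ b' = b
      · obtain ⟨h1, h2⟩ := hK
        subst h1; subst h2
        have h3 : b' ≠ a' := hba
        simp [h3, Ne.symm h3]
        push_cast
        ring
      · rw [if_neg (show ¬((a, b) = (a', b')) from by
          intro hEq
          injection hEq with h1 h2
          exact hK ⟨h1.symm, h2.symm⟩)]
        by_cases hc : a' = a ∧ b ≠ a'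
        · have hbb : (b' == b) = false := by
            simp only [beq_eq_false_iff_ne, ne_eq]
            intro h2
            exact hK ⟨hc.1, h2⟩
          simp [hc, hbb]
        · simp [hc]
    · rw [if_neg hba, ih, List.count_cons]
      push_neg at hba
      subst hba
      by_cases hc : b' = a ∧ b ≠ b'
      · have hbb : (b' == b) = false := by
          simp only [beq_eq_false_iff_ne, ne_eq]
          intro h2
          exact hc.2 h2.symm
        have hba2 : ¬ b = a := fun h => hc.2 (h.trans hc.1.symm)
        simp [hc, hba2]
        exact fun h => hba2 h.symm
      · simp [hc]

lemma both_outer (s : PySem.Set Char) :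
    ∀ (l : List Char) (d : PySem.Dict (Char × Char) Int) (a b : Char),
      (l.foldl (fun bo a' =>
        s.foldl (fun bo b' => if b' ≠ a' then bo.insert (a', b') (bo.getD (a', b') 0 + 1) else bo) bo) d).getD (a, b) 0
        = d.getD (a, b) 0 + (l.count a : Int) * (if b ≠ a then (s.count b : Int) else 0) := by
  intro l
  induction l with
  | nil => simp
  | cons a'' l ih =>
    intro d a b
    simp only [List.foldl_cons]
    rw [ih, both_inner, List.count_cons]
    by_cases h1 : a'' = a
    · subst h1
      by_cases h2 : b ≠ a'' <;> simp [h2] <;> push_cast <;> ring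
    · have hbb : ¬ (a'' == a) = true := by simpa using h1
      simp [h1, hbb]

lemma both_getD (gs : List (PySem.Set Char)) :
    ∀ (d : PySem.Dict (Char × Char) Int) (a b : Char),
      (gs.foldl (fun both s =>
        s.foldl (fun both a =>
          s.foldl (fun both b =>
            if b ≠ a then both.insert (a, b) (both.getD (a, b) 0 + 1) else both) both) both) d).getD (a, b) 0
        = d.getD (a, b) 0 + (gs.map (fun s => (s.count a : Int) * (if b ≠ a then (s.count b : Int) else 0))).sum := by
  induction gs with
  | nil => simp
  | cons s t ih =>
    intro d a b
    simp only [List.foldl_cons, List.map_cons, List.sum_cons]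
    rw [ih, both_outer]
    ring

lemma foldl_ite_add {α : Type} (l : List α) (p : α → Prop) [DecidablePred p] (v : α → Int) (t0 : Int) :
    l.foldl (fun t x => if p x then t + v x else t) t0
      = t0 + (l.map (fun x => if p x then v x else 0)).sum := by
  have hfn : (fun (t : Int) (x : α) => if p x then t + v x else t)
      = (fun (t : Int) (x : α) => t + if p x then v x else 0) := by
    funext t x
    by_cases hp : p x <;> simp [hp]
  rw [hfn, PySem.List.foldl_add]

lemma sum_map_sub {α : Type} (l : List α) (f g : α → Int) :
    (l.map (fun x => f x - g x)).sum = (l.map f).sum - (l.map g).sum := by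
  induction l with
  | nil => simp
  | cons x t ih => simp [ih]; ring

-- ==== B side assembled ====
def cntOf (gs : List (PySem.Set Char)) : PySem.Dict Char Int :=
  gs.foldl (fun cnt s => s.foldl (fun cnt a => cnt.insert a (cnt.getD a 0 + 1)) cnt) PySem.Dict.empty

def bothOf (gs : List (PySem.Set Char)) : PySem.Dict (Char × Char) Int :=
  gs.foldl (fun both s =>
    s.foldl (fun both a =>
      s.foldl (fun both b =>
        if b ≠ a then both.insert (a, b) (both.getD (a, b) 0 + 1) else both) both) both)
    PySem.Dict.empty

def bSum (gs : List (PySem.Set Char)) : Int :=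
  (cntOf gs).keys.foldl (fun total a =>
    (cntOf gs).keys.foldl (fun total b =>
      if b ≠ a then
        total + ((cntOf gs).getD a 0 - (bothOf gs).getD (a, b) 0) *
          ((cntOf gs).getD b 0 - (bothOf gs).getD (a, b) 0)
      else total) total) 0

lemma keys_cntOf (gs : List (PySem.Set Char)) :
    (cntOf gs).keys = PySem.Set.ofList gs.flatten := by
  unfold cntOf
  rw [cnt_keys, show (PySem.Dict.empty : PySem.Dict Char Int).keys = [] from rfl,
      PySem.Set.update_nil_left]

lemma getD_cntOf (gs : List (PySem.Set Char)) (a : Char) :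
    (cntOf gs).getD a 0 = (gs.map (fun s => (s.count a : Int))).sum := by
  unfold cntOf
  rw [cnt_getD]
  simp

lemma getD_bothOf (gs : List (PySem.Set Char)) (a b : Char) :
    (bothOf gs).getD (a, b) 0
      = (gs.map (fun s => (s.count a : Int) * (if b ≠ a then (s.count b : Int) else 0))).sum := by
  unfold bothOf
  rw [both_getD]
  simp

lemma termW1 (gs : List (PySem.Set Char)) (hnod : ∀ g ∈ gs, List.Nodup g) (a b : Char) (hba : b ≠ a) :
    (gs.map (fun s => (s.count a : Int))).sum
      - (gs.map (fun s => (s.count a : Int) * (if b ≠ a then (s.count b : Int) else 0))).sum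
    = W gs a b := by
  rw [← sum_map_sub, W_eq_sum]
  apply congrArg
  apply List.map_congr_left
  intro s hs
  have hnd := hnod s hs
  rw [count_nodup s hnd a, count_nodup s hnd b, if_pos hba]
  by_cases h1 : a ∈ s <;> by_cases h2 : b ∈ s <;> simp [h1, h2]

lemma termW2 (gs : List (PySem.Set Char)) (hnod : ∀ g ∈ gs, List.Nodup g) (a b : Char) (hba : b ≠ a) :
    (gs.map (fun s => (s.count b : Int))).sum
      - (gs.map (fun s => (s.count a : Int) * (if b ≠ a then (s.count b : Int) else 0))).sum
    = W gs b a := by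
  rw [← sum_map_sub, W_eq_sum]
  apply congrArg
  apply List.map_congr_left
  intro s hs
  have hnd := hnod s hs
  rw [count_nodup s hnd a, count_nodup s hnd b, if_pos hba]
  by_cases h1 : a ∈ s <;> by_cases h2 : b ∈ s <;> simp [h1, h2]

lemma B_sum (gs : List (PySem.Set Char)) (hnod : ∀ g ∈ gs, List.Nodup g) :
    bSum gs = ∑ a ∈ (PySem.Set.ofList gs.flatten).toFinset,
      ∑ b ∈ (PySem.Set.ofList gs.flatten).toFinset,
        (if b ≠ a then W gs a b * W gs b a else 0) := by
  have hnd : (PySem.Set.ofList gs.flatten).Nodup := PySem.Set.nodup_ofList _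
  unfold bSum
  rw [keys_cntOf]
  have h1 : ∀ (acc : Int), ∀ a ∈ PySem.Set.ofList gs.flatten,
      (PySem.Set.ofList gs.flatten).foldl (fun total b =>
        if b ≠ a then
          total + ((cntOf gs).getD a 0 - (bothOf gs).getD (a, b) 0) *
            ((cntOf gs).getD b 0 - (bothOf gs).getD (a, b) 0)
        else total) acc
      = acc + ((PySem.Set.ofList gs.flatten).map (fun b =>
          if b ≠ a then ((cntOf gs).getD a 0 - (bothOf gs).getD (a, b) 0) *
            ((cntOf gs).getD b 0 - (bothOf gs).getD (a, b) 0) else 0)).sum := by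
    intro acc a _
    exact foldl_ite_add _ _ _ acc
  rw [PySem.List.foldl_congr_mem _ _
      (fun total a => total + ((PySem.Set.ofList gs.flatten).map (fun b =>
          if b ≠ a then ((cntOf gs).getD a 0 - (bothOf gs).getD (a, b) 0) *
            ((cntOf gs).getD b 0 - (bothOf gs).getD (a, b) 0) else 0)).sum) 0 h1,
      PySem.List.foldl_add, zero_add, ← List.sum_toFinset _ hnd]
  apply Finset.sum_congr rfl
  intro a _
  rw [← List.sum_toFinset _ hnd]
  apply Finset.sum_congr rfl
  intro b _
  by_cases hba : b ≠ a
  · rw [if_pos hba, if_pos hba, getD_cntOf gs a, getD_cntOf gs b, getD_bothOf gs a b,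
        termW1 gs hnod a b hba, termW2 gs hnod a b hba]
  · rw [if_neg hba, if_neg hba]

-- ===== VERDICT (by name: the statement is the Claim_ definition above) =====
theorem distinctNamesGroupBySuffix_spec : Claim_equal_distinctNamesGroupBySuffix := by
  intro ideas _ _
  unfold Spec_distinctNamesGroupBySuffix
  have hnod := values_nodupA ideas
  have hA : distinctNamesGroupBySuffix ideas = pairA ((buildGroupsA ideas).values) := by
    have h0 : distinctNamesGroupBySuffix ideas
        = (PySem.List.pyRange 0 (PySem.List.len ((buildGroupsA ideas).values))).foldl
            (aBody ((buildGroupsA ideas).values)) 0 := rfl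
    rw [h0, A_eq_pairA]
  have hB0 : distinctNamesGroupBySuffix_alt ideas = bSum ((buildGroupsB ideas).values) := rfl
  rw [hA, hB0, groups_eq, B_sum _ hnod]
  exact core _ hnod _ (by
    intro g hg a ha
    rw [List.mem_toFinset, PySem.Set.mem_ofList]
    exact List.mem_flatten.2 ⟨g, hg, ha⟩)
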